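-- pv_equiv track=rewrite | github.com/D1ECH/TFG_Linux | ENTREGA FINAL/confidence.py | filter_output
-- ===== SOURCE A (Python) =====
-- def filter_output(output):
--     lines = output.split('\n')
--     filtered_lines = []
--     warning_found = False
--
--     for line in lines:
--         if '[WARNING]' in line:
--             warning_found = True
--         if not warning_found:
--             filtered_lines.append(line)
--
--     return '\n'.join(filtered_lines)
-- ===== SOURCE B (Python) =====
-- def filter_output(output):
--     lines = output.split('\n')
--     for i, line in enumerate(lines):
--         if '[WARNING]' in line:
--             return '\n'.join(lines[:i])
--     return '\n'.join(lines)
-- ===== Notes on version B (the rewrite author's own statement) =====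
-- stated objective: idiomatic
-- what changed: Replaces the boolean-flag loop that appends line by line with a scan for the index of the first '[WARNING]' line followed by a single slice-and-join of the prefix.
import Mathlib
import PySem

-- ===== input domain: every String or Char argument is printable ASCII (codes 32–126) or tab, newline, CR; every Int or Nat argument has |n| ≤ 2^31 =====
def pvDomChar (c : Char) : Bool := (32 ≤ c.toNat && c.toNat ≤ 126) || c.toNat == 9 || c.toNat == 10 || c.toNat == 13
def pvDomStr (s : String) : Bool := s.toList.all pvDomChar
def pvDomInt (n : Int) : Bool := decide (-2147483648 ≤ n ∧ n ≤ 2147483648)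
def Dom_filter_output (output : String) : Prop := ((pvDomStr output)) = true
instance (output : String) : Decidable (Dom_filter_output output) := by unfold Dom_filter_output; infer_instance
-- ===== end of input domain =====

-- B replaces A's boolean-flag append loop by finding the index of the first
-- '[WARNING]' line and joining the prefix slice before it (idiomatic; same cost).

-- ===== PORT A =====
-- flag-and-accumulator fold over the lines, exactly A's loop body
def filter_output (output : String) : String :=
  let lines := (PySem.Str.split? output "\n").getD []  -- sep ≠ "", so split? is always some
  let st := lines.foldl
    (fun (st : Bool × List String) line =>
      let warning_found := if PySem.Str.isIn "[WARNING]" line then true else st.1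
      let filtered := if !warning_found then st.2 ++ [line] else st.2
      (warning_found, filtered))
    (false, ([] : List String))
  PySem.Str.join "\n" st.2

-- ===== PORT B =====
-- B: index of the first warning line (enumerate loop), then one slice + join
def filter_output_alt (output : String) : String :=
  let lines := (PySem.Str.split? output "\n").getD []  -- sep ≠ "", so split? is always some
  match lines.findIdx? (fun line => PySem.Str.isIn "[WARNING]" line) with
  | some i => PySem.Str.join "\n" (lines.take i)
  | none => PySem.Str.join "\n" lines

-- ===== PRECONDITION & SPEC =====
def Spec_filter_output (output : String) (out : String) : Prop := out = filter_output_alt output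
instance (output : String) (out : String) : Decidable (Spec_filter_output output out) := by unfold Spec_filter_output; infer_instance

-- ===== CLAIM (what is proved, stated in full; the proofs are below) =====
def Claim_equal_filter_output : Prop := ∀ (output : String), Dom_filter_output output → Spec_filter_output output (filter_output output)

-- ===== LEMMAS AND PROOFS =====

-- the loop body of A's fold
def pvStep (st : Bool × List String) (line : String) : Bool × List String :=
  let warning_found := if PySem.Str.isIn "[WARNING]" line then true else st.1
  let filtered := if !warning_found then st.2 ++ [line] else st.2
  (warning_found, filtered)

theorem pvStep_pos (acc : List String) (b : Bool) (l : String)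
    (h : PySem.Str.isIn "[WARNING]" l = true) : pvStep (b, acc) l = (true, acc) := by
  simp only [pvStep, h, if_true, Bool.not_true, Bool.false_eq_true, if_false]

theorem pvStep_neg (acc : List String) (l : String)
    (h : PySem.Str.isIn "[WARNING]" l = false) :
    pvStep (false, acc) l = (false, acc ++ [l]) := by
  simp only [pvStep, h, Bool.false_eq_true, if_false, Bool.not_false, if_true]

theorem pvFold_true (lines : List String) (acc : List String) :
    lines.foldl pvStep (true, acc) = (true, acc) := by
  induction lines with
  | nil => rfl
  | cons l ls ih =>
    rw [List.foldl_cons]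
    by_cases h : PySem.Str.isIn "[WARNING]" l
    · rw [pvStep_pos acc true l h, ih]
    · have : pvStep (true, acc) l = (true, acc) := by
        simp only [pvStep, h, if_false, Bool.not_true, Bool.false_eq_true]
      rw [this, ih]

theorem pvFold_false (lines : List String) (acc : List String) :
    (lines.foldl pvStep (false, acc)).2 =
      acc ++ (match lines.findIdx? (fun line => PySem.Str.isIn "[WARNING]" line) with
              | some i => lines.take i
              | none => lines) := by
  induction lines generalizing acc with
  | nil => simp
  | cons l ls ih =>
    rw [List.foldl_cons, List.findIdx?_cons]
    by_cases h : PySem.Str.isIn "[WARNING]" l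
    · rw [pvStep_pos acc false l h, pvFold_true, h]
      simp
    · have hb : PySem.Str.isIn "[WARNING]" l = false := by
        revert h; cases PySem.Str.isIn "[WARNING]" l <;> simp
      rw [pvStep_neg acc l hb, ih, hb]
      simp only [Bool.false_eq_true, if_false]
      cases hfi : ls.findIdx? (fun line => PySem.Str.isIn "[WARNING]" line) <;>
        simp only [Option.map, List.append_assoc, List.take_succ_cons,
          List.cons_append, List.nil_append]
  
theorem pvPush (lines : List String) :
    PySem.Str.join "\n"
      (match lines.findIdx? (fun line => PySem.Str.isIn "[WARNING]" line) with
        | some i => lines.take i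
        | none => lines) =
    (match lines.findIdx? (fun line => PySem.Str.isIn "[WARNING]" line) with
      | some i => PySem.Str.join "\n" (lines.take i)
      | none => PySem.Str.join "\n" lines) := by
  cases lines.findIdx? (fun line => PySem.Str.isIn "[WARNING]" line) <;> rfl

-- ===== VERDICT (by name: the statement is the Claim_ definition above) =====
theorem filter_output_spec : Claim_equal_filter_output := by
  intro output _
  show filter_output output = filter_output_alt output
  unfold filter_output filter_output_alt
  show PySem.Str.join "\n"
      (List.foldl pvStep (false, []) ((PySem.Str.split? output "\n").getD [])).2 = _
  rw [pvFold_false, List.nil_append]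
  exact pvPush _
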